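-- pv_equiv track=rewrite | github.com/patrickvando/advent-of-code-2022 | day8_1.py | calc_view
-- ===== SOURCE A (Python) =====
-- def calc_view(lst, should_reverse=False):
--     res = [False] * len(lst)
--     max_ = float("-inf")
--     rang = range(len(lst))
--     if should_reverse:
--         rang = reversed(rang)
--     for k in rang:
--         if lst[k] > max_:
--             res[k] = True
--         max_ = max(max_, lst[k])
--     return res
-- ===== SOURCE B (Python) =====
-- def calc_view(lst, should_reverse=False):
--     # Brute force directly from the spec: position k is visible iff every
--     # element strictly before it (strictly after it, when should_reverse)
--     # is smaller.  No running maximum, no state between positions.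
--     n = len(lst)
--     if should_reverse:
--         return [all(lst[j] < lst[k] for j in range(k + 1, n)) for k in range(n)]
--     return [all(lst[j] < lst[k] for j in range(k)) for k in range(n)]
-- ===== Notes on version B (the rewrite author's own statement) =====
-- stated objective: alternative
-- what changed: A does a single stateful scan carrying a running maximum and mutating a preallocated result; B drops the running maximum entirely and computes each position independently by an all-pairs comparison straight from the spec: position k is marked iff every element before it (after it, when should_reverse) is strictly smaller.
import Mathlib
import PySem

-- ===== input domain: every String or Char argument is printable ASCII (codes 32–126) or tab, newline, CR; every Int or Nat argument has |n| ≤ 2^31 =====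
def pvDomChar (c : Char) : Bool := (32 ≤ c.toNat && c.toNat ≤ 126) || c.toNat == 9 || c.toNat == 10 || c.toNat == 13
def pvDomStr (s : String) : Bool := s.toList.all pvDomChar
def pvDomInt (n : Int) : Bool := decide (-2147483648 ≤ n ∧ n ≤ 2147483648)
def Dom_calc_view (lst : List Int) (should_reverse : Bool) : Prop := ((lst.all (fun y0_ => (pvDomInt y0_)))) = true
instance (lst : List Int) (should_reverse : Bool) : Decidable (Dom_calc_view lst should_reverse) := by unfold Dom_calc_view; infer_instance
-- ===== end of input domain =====

-- B replaces A's stateful running-max scan by a direct all-pairs spec check (each position compared against all prior/later elements); alternative algorithm, O(n^2) vs A's O(n).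


-- ===== PORT A =====
-- loop body: `if lst[k] > max_: res[k] = True; max_ = max(max_, lst[k])`,
-- with max_ = none playing float("-inf").  k comes from range(len(lst)) so
-- `lst.getD k.toNat 0` is exactly lst[k] (index always in range, nonnegative).
def aBody (lst : List Int) (st : List Bool × Option Int) (k : Int) : List Bool × Option Int :=
  let v := lst.getD k.toNat 0
  let res := if (match st.2 with
                 | none => true
                 | some m => decide (v > m)) then st.1.set k.toNat true else st.1
  (res, some (match st.2 with
              | none => v
              | some m => if m ≥ v then m else v))

def calc_view (lst : List Int) (should_reverse : Bool) : List Bool :=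
  let res := List.replicate lst.length false
  let rang := PySem.List.pyRange 0 lst.length 1
  let rang := if should_reverse then rang.reverse else rang   -- reversed(range(n))
  (rang.foldl (aBody lst) (res, none)).1

-- ===== PORT B =====
-- Source B: `[all(lst[j] < lst[k] for j in range(k)) for k in range(n)]`
-- (and `range(k+1, n)` in place of `range(k)` when should_reverse);
-- indices from range(...) are always in bounds, so lst[j] is lst.getD j 0.
def calc_view_alt (lst : List Int) (should_reverse : Bool) : List Bool :=
  let n := lst.length
  if should_reverse then
    (List.range n).map (fun k =>
      (List.range' (k + 1) (n - (k + 1))).all (fun j => decide (lst.getD j 0 < lst.getD k 0)))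
  else
    (List.range n).map (fun k =>
      (List.range k).all (fun j => decide (lst.getD j 0 < lst.getD k 0)))

-- ===== PRECONDITION & SPEC =====
def Spec_calc_view (lst : List Int) (should_reverse : Bool) (out : List Bool) : Prop := out = calc_view_alt lst should_reverse
instance (lst : List Int) (should_reverse : Bool) (out : List Bool) : Decidable (Spec_calc_view lst should_reverse out) := by unfold Spec_calc_view; infer_instance

-- ===== CLAIM (what is proved, stated in full; the proofs are below) =====
def Claim_equal_calc_view : Prop := ∀ (lst : List Int) (should_reverse : Bool), Dom_calc_view lst should_reverse → Spec_calc_view lst should_reverse (calc_view lst should_reverse)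

-- ===== LEMMAS AND PROOFS =====

-- "v beats the running max" (none = -inf)
def gtOpt (v : Int) : Option Int → Bool
  | none => true
  | some m => decide (v > m)

-- updated running max
def maxOpt (m : Option Int) (v : Int) : Int :=
  match m with
  | none => v
  | some m0 => max m0 v

-- reference semantics: marks of a value list under running max m
def marksF : Option Int → List Int → List Bool
  | _, [] => []
  | m, v :: vs => gtOpt v m :: marksF (some (maxOpt m v)) vs

lemma if_ge_eq_max (m0 v : Int) : (if m0 ≥ v then m0 else v) = max m0 v := by
  rw [Int.max_def]; split_ifs <;> omega

lemma aBody_eq (lst : List Int) (res : List Bool) (m : Option Int) (k : Int) :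
    aBody lst (res, m) k =
      (if gtOpt (lst.getD k.toNat 0) m then res.set k.toNat true else res,
       some (maxOpt m (lst.getD k.toNat 0))) := by
  cases m with
  | none => rfl
  | some m0 =>
      simp only [aBody, gtOpt, maxOpt, if_ge_eq_max]
      rfl

-- A's forward loop invariant
lemma aloop_fwd (lst : List Int) : ∀ (j i : Nat) (done : List Bool) (m : Option Int),
    done.length = i → i + j = lst.length →
    ((PySem.List.pyRange (i : Int) (lst.length : Int) 1).foldl (aBody lst)
        (done ++ List.replicate j false, m)).1
      = done ++ marksF m (lst.drop i) := by
  intro j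
  induction j with
  | zero =>
      intro i done m hlen hsum
      have hi : i = lst.length := by omega
      subst hi
      rw [PySem.List.pyRange_one_eq_nil (le_refl _)]
      simp [marksF]
  | succ j ih =>
      intro i done m hlen hsum
      have hi : i < lst.length := by omega
      have hv : lst.getD ((i : Int)).toNat 0 = lst[i] := by
        simp [List.getD_eq_getElem?_getD, List.getElem?_eq_getElem hi]
      have hset : (done ++ (false :: List.replicate j false)).set i true
          = done ++ (true :: List.replicate j false) := by
        rw [← hlen, List.set_append_right _ _ (le_refl _)]
        simp
      have hdrop : lst.drop i = lst[i] :: lst.drop (i + 1) :=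
        List.drop_eq_getElem_cons hi
      rw [PySem.List.pyRange_one_cons (by exact_mod_cast hi), List.replicate_succ,
        List.foldl_cons, aBody_eq]
      have hb : (if gtOpt (lst.getD ((i : Int)).toNat 0) m
            then (done ++ false :: List.replicate j false).set ((i : Int)).toNat true
            else done ++ false :: List.replicate j false)
          = (done ++ [gtOpt lst[i] m]) ++ List.replicate j false := by
        rw [hv]
        by_cases h : gtOpt lst[i] m = true
        · simp only [h, if_pos, Int.toNat_natCast, hset]
          simp
        · simp [Bool.eq_false_iff.mpr (by simpa using h)]
      have hcast : ((i : Int) + 1) = ((i + 1 : Nat) : Int) := by push_cast; ring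
      rw [hb, hcast, ih (i + 1) (done ++ [gtOpt lst[i] m])
            (some (maxOpt m (lst.getD ((i:Int)).toNat 0))) (by simp [hlen]) (by omega)]
      rw [hv, hdrop]
      simp [marksF]

-- A's reversed loop invariant
lemma aloop_rev (lst : List Int) : ∀ (i : Nat) (done : List Bool) (m : Option Int),
    i ≤ lst.length →
    (((PySem.List.pyRange 0 (i : Int) 1).reverse).foldl (aBody lst)
        (List.replicate i false ++ done, m)).1
      = (marksF m ((lst.take i).reverse)).reverse ++ done := by
  intro i
  induction i with
  | zero =>
      intro done m _
      have h0 : PySem.List.pyRange 0 ((0 : Nat) : Int) 1 = [] :=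
        PySem.List.pyRange_one_eq_nil (by simp)
      rw [h0]
      simp [marksF]
  | succ i ih =>
      intro done m hle
      have hi : i < lst.length := by omega
      have hv : lst.getD ((i : Int)).toNat 0 = lst[i] := by
        simp [List.getD_eq_getElem?_getD, List.getElem?_eq_getElem hi]
      have hset : ((List.replicate i false ++ (false :: done)).set i true)
          = List.replicate i false ++ (true :: done) := by
        rw [List.set_append_right _ _ (by simp)]
        simp
      have hcast : ((i + 1 : Nat) : Int) = (i : Int) + 1 := by push_cast; ring
      rw [hcast, PySem.List.pyRange_one_succ_right (by positivity), List.reverse_append]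
      simp only [List.reverse_cons, List.reverse_nil, List.nil_append, List.singleton_append,
        List.foldl_cons]
      have hrep : List.replicate (i + 1) false ++ done
          = List.replicate i false ++ (false :: done) := by
        rw [List.replicate_succ']
        simp [List.append_assoc]
      rw [hrep, aBody_eq]
      have hb : (if gtOpt (lst.getD ((i : Int)).toNat 0) m
            then (List.replicate i false ++ false :: done).set ((i : Int)).toNat true
            else List.replicate i false ++ false :: done)
          = List.replicate i false ++ (gtOpt lst[i] m :: done) := by
        rw [hv]
        by_cases h : gtOpt lst[i] m = true
        · simp only [h, if_pos, Int.toNat_natCast, hset]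
        · simp [Bool.eq_false_iff.mpr (by simpa using h)]
      rw [hb, ih (gtOpt lst[i] m :: done) (some (maxOpt m (lst.getD ((i:Int)).toNat 0))) (by omega)]
      have htake : lst.take (i + 1) = lst.take i ++ [lst[i]] := by
        rw [List.take_add_one]
        simp [List.getElem?_eq_getElem hi]
      rw [hv, htake]
      have hrev : (lst.take i ++ [lst[i]]).reverse = lst[i] :: (lst.take i).reverse := by
        simp
      rw [hrev]
      simp only [marksF, List.reverse_cons, List.append_assoc, List.cons_append, List.nil_append]

lemma calc_view_eq_marks (lst : List Int) (should_reverse : Bool) :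
    calc_view lst should_reverse
      = if should_reverse then (marksF none lst.reverse).reverse else marksF none lst := by
  cases should_reverse with
  | false =>
      simp only [calc_view, Bool.false_eq_true, if_false]
      have := aloop_fwd lst lst.length 0 [] none rfl (by omega)
      simpa using this
  | true =>
      simp only [calc_view, if_true]
      have := aloop_rev lst lst.length [] none (le_refl _)
      simpa using this

-- B-side: the running-max mark at position k is exactly "all earlier values smaller"
lemma gtOpt_maxOpt (w v : Int) (m : Option Int) :
    gtOpt w (some (maxOpt m v)) = (gtOpt w m && decide (v < w)) := by
  cases m with
  | none => simp [gtOpt, maxOpt]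
  | some m0 =>
      simp only [gtOpt, maxOpt]
      by_cases h1 : w > m0 <;> by_cases h2 : v < w <;>
        simp [h1, h2, Int.max_def] <;> split_ifs <;> omega

lemma marksF_eq_spec (vs : List Int) : ∀ (m : Option Int),
    marksF m vs = (List.range vs.length).map
      (fun k => gtOpt (vs.getD k 0) m && (vs.take k).all (fun x => decide (x < vs.getD k 0))) := by
  induction vs with
  | nil => intro m; simp [marksF]
  | cons v vs ih =>
      intro m
      simp only [marksF, List.length_cons, List.range_succ_eq_map, List.map_cons, List.map_map]
      congr 1
      · simp
      · rw [ih (some (maxOpt m v))]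
        apply List.map_congr_left
        intro k _
        simp [Function.comp, gtOpt_maxOpt, Bool.and_assoc]

-- bridges: maps over index ranges realize take/drop segments
lemma range_map_getD (lst : List Int) (k : Nat) (hk : k ≤ lst.length) :
    (List.range k).map (fun j => lst.getD j 0) = lst.take k := by
  apply List.ext_getElem
  · simp [hk]
  · intro i h1 h2
    have hi : i < k := by simpa using h1
    have : i < lst.length := lt_of_lt_of_le hi hk
    simp [List.getD_eq_getElem?_getD, List.getElem?_eq_getElem this]

lemma range'_map_getD (lst : List Int) (a : Nat) :
    (List.range' a (lst.length - a)).map (fun j => lst.getD j 0) = lst.drop a := by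
  apply List.ext_getElem
  · simp
  · intro i h1 h2
    have hi : i < lst.length - a := by simpa using h1
    have hia : a + i < lst.length := by omega
    simp [List.getD_eq_getElem?_getD, List.getElem?_eq_getElem hia]

lemma marksF_length (vs : List Int) : (marksF none vs).length = vs.length := by
  rw [marksF_eq_spec]; simp

lemma marks_none_getD (vs : List Int) (k : Nat) (hk : k < vs.length) :
    (marksF none vs).getD k false = (vs.take k).all (fun x => decide (x < vs.getD k 0)) := by
  rw [marksF_eq_spec, List.getD_eq_getElem?_getD, List.getElem?_map,
    List.getElem?_range hk]
  simp [gtOpt]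

-- forward case
lemma fwd_case (lst : List Int) :
    marksF none lst = (List.range lst.length).map
      (fun k => (List.range k).all (fun j => decide (lst.getD j 0 < lst.getD k 0))) := by
  rw [marksF_eq_spec]
  apply List.map_congr_left
  intro k hk
  have hk' : k ≤ lst.length := le_of_lt (by simpa using hk)
  simp [gtOpt, ← range_map_getD lst k hk', List.all_map, Function.comp_def]

-- reversed case
lemma rev_case (lst : List Int) :
    (marksF none lst.reverse).reverse = (List.range lst.length).map
      (fun k => (List.range' (k + 1) (lst.length - (k + 1))).all
        (fun j => decide (lst.getD j 0 < lst.getD k 0))) := by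
  apply List.ext_getElem
  · simp [marksF_length]
  · intro k h1 h2
    have hk : k < lst.length := by simpa using h2
    have hlen : (marksF none lst.reverse).length = lst.length := by simp [marksF_length]
    have hk1 : k < (marksF none lst.reverse).length := by omega
    have hk2 : lst.length - 1 - k < lst.reverse.length := by simp; omega
    have hL : (marksF none lst.reverse).reverse[k]'h1
        = (marksF none lst.reverse).getD (lst.length - 1 - k) false := by
      have e1 : (marksF none lst.reverse).reverse[k]'h1
          = ((marksF none lst.reverse).reverse[k]?).getD false := by
        simp [List.getElem?_eq_getElem h1]
      rw [e1, List.getElem?_reverse hk1, hlen, ← List.getD_eq_getElem?_getD]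
    rw [hL, marks_none_getD lst.reverse (lst.length - 1 - k) (by simpa using hk2)]
    have hrevget : lst.reverse.getD (lst.length - 1 - k) 0 = lst.getD k 0 := by
      have h3 : lst.reverse[lst.length - 1 - k]'hk2 = lst[k]'hk := by
        rw [List.getElem_reverse]
        congr 1
        omega
      simp [List.getD_eq_getElem?_getD, List.getElem?_eq_getElem hk2,
        List.getElem?_eq_getElem hk, h3]
    have htake : lst.reverse.take (lst.length - 1 - k) = (lst.drop (k + 1)).reverse := by
      rw [List.reverse_drop]
      congr 1
      omega
    rw [hrevget, htake, List.all_reverse]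
    have := range'_map_getD lst (k + 1)
    rw [List.getElem_map, List.getElem_range, ← this, List.all_map]
    rfl

lemma calc_view_alt_eq (lst : List Int) (should_reverse : Bool) :
    calc_view_alt lst should_reverse
      = if should_reverse then (marksF none lst.reverse).reverse else marksF none lst := by
  cases should_reverse with
  | false => simp [calc_view_alt, fwd_case]
  | true => simp [calc_view_alt, rev_case]

-- ===== VERDICT (by name: the statement is the Claim_ definition above) =====
theorem calc_view_spec : Claim_equal_calc_view := by
  intro lst should_reverse _
  unfold Spec_calc_view
  rw [calc_view_eq_marks, calc_view_alt_eq]
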